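-- pv_equiv track=rewrite | github.com/GabrielMoraisReis/JogoPalavras | pontuacao.py | desempate
-- ===== SOURCE A (Python) =====
-- def desempate(palavras_maior_valor):
--     index = 0
--     tam_menor_word = len(palavras_maior_valor[0])
--     palavras_menor_len = list()
--     melhor_palavra = ''
--     for word in palavras_maior_valor:       #desempate por tamanho de palavra
--         if len(word) < tam_menor_word:
--             tam_menor_word = len(word)
--             palavras_menor_len.clear()
--             palavras_menor_len.append(word)
--         elif len(word) == tam_menor_word:
--             palavras_menor_len.append(word)
--     if len(palavras_menor_len) > 1:     #desempate por ordem alfabética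
--         palavras_menor_len.sort()
--     return palavras_menor_len[0]
-- ===== SOURCE B (Python) =====
-- def desempate(palavras_maior_valor):
--     return sorted(palavras_maior_valor, key=lambda w: (len(w), w))[0]
-- ===== Notes on version B (the rewrite author's own statement) =====
-- stated objective: simpler
-- what changed: Replaces A's two-phase scan (build a minimum-length bucket, then conditionally sort the bucket) with one sort of the whole list by the compound key (len(w), w) and an O(1) pick of the first element.
import Mathlib
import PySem

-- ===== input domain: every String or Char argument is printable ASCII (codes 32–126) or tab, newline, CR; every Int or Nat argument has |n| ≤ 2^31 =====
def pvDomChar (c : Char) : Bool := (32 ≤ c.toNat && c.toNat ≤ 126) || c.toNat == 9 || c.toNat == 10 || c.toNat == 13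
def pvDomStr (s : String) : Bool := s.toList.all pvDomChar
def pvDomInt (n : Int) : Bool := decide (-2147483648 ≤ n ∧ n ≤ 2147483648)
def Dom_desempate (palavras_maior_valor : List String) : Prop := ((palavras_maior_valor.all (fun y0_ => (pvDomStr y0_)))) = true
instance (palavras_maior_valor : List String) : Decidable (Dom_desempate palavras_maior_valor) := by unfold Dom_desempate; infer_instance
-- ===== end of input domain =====

-- B replaces A's two-phase scan (min-length bucket, then sort the bucket) by one sort of the
-- whole list under the compound key (len(w), w) and an O(1) pick of the first element (simpler).

-- ===== PORT A =====
-- A's loop: running minimum length + bucket of words attaining it; then sort the bucket if it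
-- has more than one word and return its first element.  xs[0] on the empty list raises
-- IndexError in Python; Pre_ excludes [], so headD "" is never the value claimed about.
def desempate (palavras_maior_valor : List String) : String :=
  let tam0 : Int := PySem.Str.len (palavras_maior_valor.headD "")
  let st := palavras_maior_valor.foldl
    (fun (s : Int × List String) w =>
      if PySem.Str.len w < s.1 then (PySem.Str.len w, [w])
      else if PySem.Str.len w = s.1 then (s.1, s.2 ++ [w])
      else s)
    (tam0, ([] : List String))
  let bucket := if st.2.length > 1 then PySem.List.sorted st.2 (fun w => w) false else st.2
  bucket.headD ""

-- ===== PORT B =====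
-- sorted(xs, key=lambda w: (len(w), w))[0]; [0] on [] raises IndexError, excluded by Pre_.
def desempate_alt (palavras_maior_valor : List String) : String :=
  (PySem.List.sorted2 palavras_maior_valor (fun w => PySem.Str.len w) (fun w => w) false).headD ""

-- ===== PRECONDITION & SPEC =====
-- Pre_ excludes exactly the empty list, on which both Pythons raise IndexError.
def Pre_desempate (palavras_maior_valor : List String) : Prop := palavras_maior_valor ≠ []
instance (palavras_maior_valor : List String) : Decidable (Pre_desempate palavras_maior_valor) := by unfold Pre_desempate; infer_instance

def pvWitness_desempate : List String := ["casa", "sol", "mar"]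

def Spec_desempate (palavras_maior_valor : List String) (out : String) : Prop := out = desempate_alt palavras_maior_valor
instance (palavras_maior_valor : List String) (out : String) : Decidable (Spec_desempate palavras_maior_valor out) := by unfold Spec_desempate; infer_instance

-- ===== CLAIM (what is proved, stated in full; the proofs are below) =====
def Claim_equal_desempate : Prop := ∀ (palavras_maior_valor : List String), Dom_desempate palavras_maior_valor → Pre_desempate palavras_maior_valor → Spec_desempate palavras_maior_valor (desempate palavras_maior_valor)

-- ===== LEMMAS AND PROOFS =====

-- Python's tuple comparison (len(a), a) < (len(b), b), as the Bool sorted2 uses internally.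
def lexLt (a b : String) : Bool :=
  decide (PySem.Str.len a < PySem.Str.len b) ||
    (!decide (PySem.Str.len b < PySem.Str.len a) && decide (a < b))

lemma lexLt_iff (a b : String) :
    lexLt a b = true ↔ (PySem.Str.len a < PySem.Str.len b ∨
      (PySem.Str.len a = PySem.Str.len b ∧ a < b)) := by
  unfold lexLt
  by_cases h1 : PySem.Str.len a < PySem.Str.len b <;>
  by_cases h2 : PySem.Str.len b < PySem.Str.len a <;>
  by_cases h3 : a < b <;> simp [h1, h2, h3] <;> omega

lemma lexLt_asymm (a b : String) (h : lexLt a b = true) : lexLt b a = false := by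
  rw [lexLt_iff] at h
  by_contra hc
  have hb : lexLt b a = true := by
    cases hba : lexLt b a with
    | true => rfl
    | false => exact absurd hba hc
  rw [lexLt_iff] at hb
  rcases h with h | ⟨he, hlt⟩ <;> rcases hb with hb | ⟨hbe, hblt⟩
  · omega
  · omega
  · omega
  · exact absurd (lt_trans hlt hblt) (lt_irrefl a)

lemma lexLt_trans (a b c : String) (h1 : lexLt a b = true) (h2 : lexLt b c = true) :
    lexLt a c = true := by
  rw [lexLt_iff] at h1 h2 ⊢
  rcases h1 with h1 | ⟨he1, hl1⟩ <;> rcases h2 with h2 | ⟨he2, hl2⟩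
  · exact Or.inl (lt_trans h1 h2)
  · exact Or.inl (by omega)
  · exact Or.inl (by omega)
  · exact Or.inr ⟨by omega, lt_trans hl1 hl2⟩

lemma lexLt_irrefl (a : String) : lexLt a a = false := by
  cases h : lexLt a a with
  | false => rfl
  | true => exact absurd (lexLt_asymm a a h) (by simp [h])

lemma insertBy_cons (before : String → String → Bool) (x m : String) (t : List String) :
    PySem.List.insertBy before x (m :: t) =
      if before x m then x :: m :: t else m :: PySem.List.insertBy before x t := by
  rfl

-- head of the insertion-sort fold: a minimum under lexLt, provided the current head already is one
lemma foldl_insertBy_head :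
    ∀ (l : List String) (h : String) (t : List String),
      (∀ y ∈ h :: t, lexLt y h = false) →
      ∃ h' t', l.foldl (fun acc x => PySem.List.insertBy lexLt x acc) (h :: t) = h' :: t' ∧
        (h' = h ∨ h' ∈ l) ∧ (∀ y ∈ h :: t, lexLt y h' = false) ∧ (∀ y ∈ l, lexLt y h' = false)
  | [], h, t, hmin => ⟨h, t, rfl, Or.inl rfl, hmin, by simp⟩
  | x :: l, h, t, hmin => by
    simp only [List.foldl_cons, insertBy_cons]
    by_cases hxh : lexLt x h = true
    · rw [if_pos hxh]
      have hmin' : ∀ y ∈ x :: h :: t, lexLt y x = false := by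
        intro y hy
        rcases List.mem_cons.1 hy with rfl | hy
        · exact lexLt_irrefl y
        · rcases List.mem_cons.1 hy with rfl | hy
          · exact lexLt_asymm x y hxh
          · by_contra hc
            have hyx : lexLt y x = true := by
              cases h' : lexLt y x with
              | true => rfl
              | false => exact absurd h' hc
            have := lexLt_trans y x h hyx hxh
            have := hmin y (List.mem_cons_of_mem _ hy)
            simp_all
      obtain ⟨h', t', heq, hmem, hacc, hl⟩ := foldl_insertBy_head l x (h :: t) hmin'
      refine ⟨h', t', heq, ?_, ?_, ?_⟩
      · rcases hmem with rfl | hm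
        · exact Or.inr (List.mem_cons_self)
        · exact Or.inr (List.mem_cons_of_mem _ hm)
      · intro y hy; exact hacc y (List.mem_cons_of_mem _ hy)
      · intro y hy
        rcases List.mem_cons.1 hy with rfl | hy
        · exact hacc y List.mem_cons_self
        · exact hl y hy
    · rw [if_neg hxh]
      have hxh' : lexLt x h = false := by
        cases h' : lexLt x h with
        | false => rfl
        | true => exact absurd h' hxh
      have hmin' : ∀ y ∈ h :: PySem.List.insertBy lexLt x t, lexLt y h = false := by
        intro y hy
        rcases List.mem_cons.1 hy with rfl | hy
        · exact lexLt_irrefl y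
        · rcases (PySem.List.mem_insertBy lexLt x y t).1 hy with rfl | hy
          · exact hxh'
          · exact hmin y (List.mem_cons_of_mem _ hy)
      obtain ⟨h', t', heq, hmem, hacc, hl⟩ :=
        foldl_insertBy_head l h (PySem.List.insertBy lexLt x t) hmin'
      refine ⟨h', t', heq, ?_, ?_, ?_⟩
      · rcases hmem with rfl | hm
        · exact Or.inl rfl
        · exact Or.inr (List.mem_cons_of_mem _ hm)
      · intro y hy
        rcases List.mem_cons.1 hy with rfl | hy
        · exact hacc y List.mem_cons_self
        · exact hacc y (List.mem_cons_of_mem _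
            ((PySem.List.mem_insertBy lexLt x y t).2 (Or.inr hy)))
      · intro y hy
        rcases List.mem_cons.1 hy with rfl | hy
        · exact hacc y (List.mem_cons_of_mem _
            ((PySem.List.mem_insertBy lexLt y y t).2 (Or.inl rfl)))
        · exact hl y hy

lemma sorted2_eq_foldl (xs : List String) :
    PySem.List.sorted2 xs (fun w => PySem.Str.len w) (fun w => w) false =
      xs.foldl (fun acc x => PySem.List.insertBy lexLt x acc) [] := by
  rfl

-- B's value: a member of xs that no member precedes under lexLt
lemma alt_char (x : String) (l : List String) :
    ∃ h', desempate_alt (x :: l) = h' ∧ h' ∈ x :: l ∧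
      ∀ y ∈ x :: l, lexLt y h' = false := by
  have h0 : ∀ y ∈ [x], lexLt y x = false := by
    intro y hy; simp at hy; subst hy; exact lexLt_irrefl y
  obtain ⟨h', t', heq, hmem, hacc, hl⟩ := foldl_insertBy_head l x [] h0
  refine ⟨h', ?_, ?_, ?_⟩
  · unfold desempate_alt
    rw [sorted2_eq_foldl]
    simp only [List.foldl_cons]
    have : PySem.List.insertBy lexLt x ([] : List String) = [x] := rfl
    rw [this, heq]
    rfl
  · rcases hmem with rfl | hm
    · exact List.mem_cons_self
    · exact List.mem_cons_of_mem _ hm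
  · intro y hy
    rcases List.mem_cons.1 hy with rfl | hy
    · exact hacc y List.mem_cons_self
    · exact hl y hy

-- ------- A side -------

-- running minimum of lengths
def minLen (l : List String) (t : Int) : Int :=
  l.foldl (fun a w => min a (PySem.Str.len w)) t

lemma minLen_le (l : List String) (t : Int) : minLen l t ≤ t := by
  induction l generalizing t with
  | nil => simp [minLen]
  | cons w l ih =>
    have := ih (min t (PySem.Str.len w))
    simp only [minLen, List.foldl_cons] at *
    omega

lemma minLen_min (l : List String) (t : Int) : ∀ w ∈ l, minLen l t ≤ PySem.Str.len w := by
  induction l generalizing t with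
  | nil => simp
  | cons x l ih =>
    intro w hw
    rcases List.mem_cons.1 hw with rfl | hw
    · have := minLen_le l (min t (PySem.Str.len w))
      simp only [minLen, List.foldl_cons] at *
      omega
    · exact ih (min t (PySem.Str.len x)) w hw

lemma minLen_mem (l : List String) (t : Int) :
    minLen l t = t ∨ ∃ w ∈ l, PySem.Str.len w = minLen l t := by
  induction l generalizing t with
  | nil => exact Or.inl rfl
  | cons x l ih =>
    rcases ih (min t (PySem.Str.len x)) with h | ⟨w, hw, hlen⟩
    · simp only [minLen, List.foldl_cons] at *
      by_cases hx : PySem.Str.len x < t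
      · exact Or.inr ⟨x, List.mem_cons_self, by omega⟩
      · exact Or.inl (by omega)
    · exact Or.inr ⟨w, List.mem_cons_of_mem _ hw,
        by simp only [minLen, List.foldl_cons] at *; omega⟩

-- A's fold computes the running minimum and the bucket of all words attaining it
lemma a_fold_eq (l : List String) (t : Int) (b : List String) :
    l.foldl (fun (s : Int × List String) w =>
      if PySem.Str.len w < s.1 then (PySem.Str.len w, [w])
      else if PySem.Str.len w = s.1 then (s.1, s.2 ++ [w])
      else s) (t, b) =
    (minLen l t,
      (if minLen l t = t then b else []) ++ l.filter (fun w => PySem.Str.len w = minLen l t)) := by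
  induction l generalizing t b with
  | nil => simp [minLen]
  | cons w l ih =>
    have hle : minLen l (min t (PySem.Str.len w)) ≤ min t (PySem.Str.len w) := minLen_le _ _
    have hml : minLen (w :: l) t = minLen l (min t (PySem.Str.len w)) := rfl
    simp only [List.foldl_cons, hml, List.filter_cons]
    by_cases h1 : PySem.Str.len w < t
    · have hmm : min t (PySem.Str.len w) = PySem.Str.len w := by omega
      rw [if_pos h1, ih, hmm]
      rw [hmm] at hle
      refine Prod.ext rfl ?_
      have hne : minLen l (PySem.Str.len w) ≠ t := by omega
      split_ifs with c1 c2 c2 <;> simp only [decide_eq_true_eq] at * <;>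
        first | rfl | omega | (exfalso; omega) | simp_all
    · rw [if_neg h1]
      have hmm : min t (PySem.Str.len w) = t := by omega
      rw [hmm] at hle ⊢
      by_cases h2 : PySem.Str.len w = t
      · rw [if_pos h2, ih]
        refine Prod.ext rfl ?_
        split_ifs with c1 c2 c2 <;> simp only [decide_eq_true_eq] at * <;>
          first | (rw [List.append_assoc]; rfl) | rfl | omega | (exfalso; omega) | simp_all
      · rw [if_neg h2, ih]
        refine Prod.ext rfl ?_
        split_ifs with c1 c2 c2 <;> simp only [decide_eq_true_eq] at * <;>
          first | rfl | omega | (exfalso; omega) | simp_all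

-- A's value: a member of the min-length bucket that is ≤ every bucket member
lemma a_char (x : String) (l : List String) :
    ∃ r, desempate (x :: l) = r ∧
      r ∈ (x :: l).filter (fun w => PySem.Str.len w = minLen (x :: l) (PySem.Str.len x)) ∧
      ∀ y ∈ (x :: l).filter (fun w => PySem.Str.len w = minLen (x :: l) (PySem.Str.len x)),
        r ≤ y := by
  set t0 := PySem.Str.len x with ht0
  set M := minLen (x :: l) t0 with hM
  set bucket := (x :: l).filter (fun w => PySem.Str.len w = M) with hbucket
  have hbne : bucket ≠ [] := by
    rcases minLen_mem (x :: l) t0 with h | ⟨w, hw, hlen⟩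
    · have hx : x ∈ bucket := by
        rw [hbucket]
        refine List.mem_filter.2 ⟨List.mem_cons_self, ?_⟩
        simp only [decide_eq_true_eq]; omega
      intro hc; rw [hc] at hx; exact absurd hx (List.not_mem_nil)
    · have hx : w ∈ bucket := by
        rw [hbucket]
        exact List.mem_filter.2 ⟨hw, by simp only [decide_eq_true_eq]; omega⟩
      intro hc; rw [hc] at hx; exact absurd hx (List.not_mem_nil)
  have hdes : desempate (x :: l) =
      (if bucket.length > 1 then PySem.List.sorted bucket (fun w => w) false else bucket).headD "" := by
    unfold desempate
    simp only [List.headD_cons]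
    rw [a_fold_eq (x :: l) (PySem.Str.len x) []]
    have : (if minLen (x :: l) (PySem.Str.len x) = PySem.Str.len x then ([] : List String) else []) = [] := by
      split <;> rfl
    rw [this, List.nil_append]
  by_cases hlen : bucket.length > 1
  · rw [if_pos hlen] at hdes
    have hsne : PySem.List.sorted bucket (fun w => w) false ≠ [] := by
      intro hc
      exact hbne ((PySem.List.sorted_eq_nil_iff bucket (fun w => w) false).1 hc)
    obtain ⟨m, tl, hmt⟩ := List.exists_cons_of_ne_nil hsne
    refine ⟨m, by rw [hdes, hmt]; rfl, ?_, ?_⟩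
    · have : m ∈ PySem.List.sorted bucket (fun w => w) false := by rw [hmt]; exact List.mem_cons_self
      exact (PySem.List.mem_sorted bucket (fun w => w) false m).1 this
    · intro y hy
      exact PySem.List.key_head_sorted_le bucket (fun w => w) hmt y hy
  · rw [if_neg hlen] at hdes
    obtain ⟨m, tl, hmt⟩ := List.exists_cons_of_ne_nil hbne
    have htl : tl = [] := by
      have hb1 : bucket.length ≤ 1 := Nat.le_of_not_lt hlen
      rw [hmt] at hb1
      simp only [List.length_cons] at hb1
      exact List.eq_nil_of_length_eq_zero (by omega)
    subst htl
    refine ⟨m, by rw [hdes, hmt]; rfl, by rw [hmt]; exact List.mem_cons_self, ?_⟩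
    intro y hy
    rw [hmt] at hy
    simp at hy
    exact le_of_eq hy.symm

-- ===== VERDICT (by name: the statement is the Claim_ definition above) =====
theorem desempate_spec : Claim_equal_desempate := by
  intro xs _ hpre
  obtain ⟨x, l, rfl⟩ := List.exists_cons_of_ne_nil hpre
  obtain ⟨h', hb, hbmem, hbmin⟩ := alt_char x l
  obtain ⟨r, ha, hamem, hamin⟩ := a_char x l
  rw [Spec_desempate, ha, hb]
  have hrmem := List.mem_filter.1 hamem
  have hrlen : PySem.Str.len r = minLen (x :: l) (PySem.Str.len x) := by
    have := hrmem.2; simpa using this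
  have hle : minLen (x :: l) (PySem.Str.len x) ≤ PySem.Str.len h' :=
    minLen_min (x :: l) (PySem.Str.len x) h' hbmem
  have hh'len : PySem.Str.len h' = minLen (x :: l) (PySem.Str.len x) := by
    by_contra hne
    have hlt : PySem.Str.len r < PySem.Str.len h' := by omega
    have h1 : lexLt r h' = true := (lexLt_iff r h').2 (Or.inl hlt)
    have h2 : lexLt r h' = false := hbmin r hrmem.1
    rw [h1] at h2; exact Bool.noConfusion h2
  have hh'bucket : h' ∈ (x :: l).filter
      (fun w => PySem.Str.len w = minLen (x :: l) (PySem.Str.len x)) :=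
    List.mem_filter.2 ⟨hbmem, by simpa using hh'len⟩
  have h1 : r ≤ h' := hamin h' hh'bucket
  have h2 : h' ≤ r := by
    by_contra hc
    have hlt : r < h' := not_le.1 hc
    have ht : lexLt r h' = true := (lexLt_iff r h').2 (Or.inr ⟨by omega, hlt⟩)
    have hf : lexLt r h' = false := hbmin r hrmem.1
    rw [ht] at hf; exact Bool.noConfusion hf
  exact le_antisymm h1 h2
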